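-- pv_equiv track=rewrite | github.com/sgttomas/chirality-app-dev | execution/_Reconciliation/DepClosure/CLOSURE_AUDIT_DEP_CLOSURE_2026-02-22_2123/analyze_closure.py | find_bidirectional_pairs
-- ===== SOURCE A (Python) =====
-- def find_bidirectional_pairs(edges):
--     """Find pairs where A->B and B->A both exist."""
--     edge_set = set()
--     for frm, to, dep_id, *_ in edges:
--         edge_set.add((frm, to))
--
--     pairs = []
--     seen = set()
--     for frm, to in edge_set:
--         if (to, frm) in edge_set:
--             key = tuple(sorted([frm, to]))
--             if key not in seen:
--                 seen.add(key)
--                 pairs.append(key)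
--     return sorted(pairs)
-- ===== SOURCE B (Python) =====
-- def find_bidirectional_pairs(edges):
--     """Find pairs where A->B and B->A both exist."""
--     # Canonicalize each edge into (min, max, reversed?) token, dedupe, sort,
--     # then a single linear scan of the sorted tokens: a pair is bidirectional
--     # iff it is a self-loop token or two adjacent tokens share the same (min, max).
--     tokens = sorted({(min(frm, to), max(frm, to), frm > to) for frm, to, dep_id, *_ in edges})
--     pairs = []
--     i = 0
--     while i < len(tokens):
--         a, b, rev = tokens[i]
--         if a == b:
--             pairs.append((a, b))
--             i += 1
--         elif i + 1 < len(tokens) and tokens[i + 1][:2] == (a, b):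
--             pairs.append((a, b))
--             i += 2
--         else:
--             i += 1
--     return pairs
-- ===== Notes on version B (the rewrite author's own statement) =====
-- stated objective: alternative
-- what changed: B replaces A's hash-set reverse-membership lookups by a sort-then-scan algorithm: each edge is canonicalized into a (min,max,reversed?) token, the distinct tokens are sorted, and one linear scan emits a pair when it sees a self-loop token or two adjacent tokens with the same (min,max); no membership test against the edge set remains.
import Mathlib
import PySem

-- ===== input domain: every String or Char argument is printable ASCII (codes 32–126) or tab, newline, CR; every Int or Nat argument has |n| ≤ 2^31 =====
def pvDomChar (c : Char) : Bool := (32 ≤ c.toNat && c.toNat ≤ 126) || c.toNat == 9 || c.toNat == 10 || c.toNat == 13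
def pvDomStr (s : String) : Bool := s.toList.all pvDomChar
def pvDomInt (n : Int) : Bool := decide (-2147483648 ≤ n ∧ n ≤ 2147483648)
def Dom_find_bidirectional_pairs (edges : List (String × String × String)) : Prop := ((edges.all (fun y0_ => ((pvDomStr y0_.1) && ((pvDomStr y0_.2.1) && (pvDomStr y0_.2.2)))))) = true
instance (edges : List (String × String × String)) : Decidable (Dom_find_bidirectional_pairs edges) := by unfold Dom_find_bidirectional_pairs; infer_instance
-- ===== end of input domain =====

-- B finds bidirectional pairs by dedupe + sort of canonical (min,max,reversed?) tokens and one
-- adjacent-pair scan, instead of A's edge-set reverse-membership lookups (same return value).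
-- ===== PORT A =====
-- tuple(sorted([a, b])): stable sort of the two-element list, then the tuple of its entries (exact)
def pySortedPair (a b : String) : String × String :=
  let s := PySem.List.sorted [a, b] (fun x => x) false
  (s.getD 0 a, s.getD 1 b)

def find_bidirectional_pairs (edges : List (String × String × String)) : List (String × String) :=
  let edge_set : PySem.Set (String × String) :=
    edges.foldl (fun s e => PySem.Set.add s (e.1, e.2.1)) PySem.Set.empty
  let res :=
    edge_set.foldl
      (fun (st : List (String × String) × PySem.Set (String × String)) p =>
        if (p.2, p.1) ∈ edge_set then
          let key := pySortedPair p.1 p.2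
          if key ∈ st.2 then st else (st.1 ++ [key], PySem.Set.add st.2 key)
        else st)
      ([], PySem.Set.empty)
  PySem.List.sorted2 res.1 Prod.fst Prod.snd false

-- ===== PORT B =====
-- (min(frm,to), max(frm,to), frm > to): Python's min/max return the first argument on a tie
def pvToken (frm t : String) : String × String × Bool :=
  if frm > t then (t, frm, true) else (frm, t, false)

-- the while loop over the sorted token list: i+=1 on a self-loop or no match, i+=2 on a match
def pvScan : List (String × String × Bool) → List (String × String)
  | [] => []
  | (a, b, _) :: rest =>
    if a = b then (a, b) :: pvScan rest
    else
      match rest with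
      | [] => []
      | t :: rest' => if t.1 = a ∧ t.2.1 = b then (a, b) :: pvScan rest' else pvScan (t :: rest')

-- Python compares (str, str, bool) tuples lexicographically: the identity sort of the token
-- set is PySem.List.sorted with the injective lexicographic key below (exact)
def pvKey3 (t : String × String × Bool) : Lex (String × Lex (String × Bool)) :=
  toLex (t.1, toLex (t.2.1, t.2.2))

def find_bidirectional_pairs_alt (edges : List (String × String × String)) : List (String × String) :=
  let toks : PySem.Set (String × String × Bool) :=
    edges.foldl (fun s e => PySem.Set.add s (pvToken e.1 e.2.1)) PySem.Set.empty
  pvScan (PySem.List.sorted toks pvKey3 false)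

-- ===== PRECONDITION & SPEC =====
def Spec_find_bidirectional_pairs (edges : List (String × String × String)) (out : List (String × String)) : Prop := out = find_bidirectional_pairs_alt edges
instance (edges : List (String × String × String)) (out : List (String × String)) : Decidable (Spec_find_bidirectional_pairs edges out) := by unfold Spec_find_bidirectional_pairs; infer_instance

-- ===== CLAIM (what is proved, stated in full; the proofs are below) =====
def Claim_equal_find_bidirectional_pairs : Prop := ∀ (edges : List (String × String × String)), Dom_find_bidirectional_pairs edges → Spec_find_bidirectional_pairs edges (find_bidirectional_pairs edges)

-- ===== LEMMAS AND PROOFS =====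

-- `for p in L: if cond p and key p not in seen: seen.add(key p); pairs.append(key p)`,
-- started with pairs = seen as lists: the loop keeps them equal, each step being a Set.add
lemma loopA_eq (cond : String × String → Prop) [DecidablePred cond]
    (key : String × String → String × String)
    (L : List (String × String)) (seen : PySem.Set (String × String)) :
    L.foldl
      (fun (st : List (String × String) × PySem.Set (String × String)) p =>
        if cond p then
          if key p ∈ st.2 then st else (st.1 ++ [key p], PySem.Set.add st.2 (key p))
        else st)
      (seen, seen)
      = (PySem.Set.update seen ((L.filter fun p => decide (cond p)).map key),
         PySem.Set.update seen ((L.filter fun p => decide (cond p)).map key)) := by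
  induction L generalizing seen with
  | nil => simp [PySem.Set.update_nil]
  | cons p L ih =>
    simp only [List.foldl_cons, List.filter_cons, decide_eq_true_eq]
    by_cases hc : cond p
    · rw [if_pos hc, if_pos hc]
      have hstep :
          (if key p ∈ (seen, seen).2 then (seen, seen)
           else ((seen, seen).1 ++ [key p], PySem.Set.add (seen, seen).2 (key p)))
            = (PySem.Set.add seen (key p), PySem.Set.add seen (key p)) := by
        by_cases hm : key p ∈ seen
        · simp only [if_pos hm, PySem.Set.add_of_mem hm]
        · simp only [if_neg hm]
          rw [PySem.Set.add_of_not_mem hm]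
      rw [hstep, ih, List.map_cons, PySem.Set.update_cons]
    · rw [if_neg hc, if_neg hc, ih]

def minmaxPair (a b : String) : String × String := if a ≤ b then (a, b) else (b, a)

lemma pySortedPair_eq_minmax (a b : String) : pySortedPair a b = minmaxPair a b := by
  unfold pySortedPair minmaxPair
  by_cases h : b.toList < a.toList
  · simp [PySem.List.sorted, PySem.List.insertBy, h, not_le.mpr h]
  · simp [PySem.List.sorted, PySem.List.insertBy, h, not_lt.mp h]

def pvPairKey (x : String × String) : Lex (String × String) := toLex (x.1, x.2)

-- Python compares (String × String) tuples lexicographically: sorted2 is sorted by the toLex key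
lemma sorted2_eq_sorted_toLex (xs : List (String × String)) :
    PySem.List.sorted2 xs Prod.fst Prod.snd false
      = PySem.List.sorted xs pvPairKey false := by
  rw [PySem.List.sorted_eq_foldl_insertBy]
  show List.foldl
      (fun acc x =>
        PySem.List.insertBy
          (fun a b => decide (a.1 < b.1) || !decide (b.1 < a.1) && decide (a.2 < b.2)) x acc)
      [] xs = _
  congr 1
  funext acc x
  congr 1
  funext a b
  rcases lt_trichotomy a.1 b.1 with h | h | h
  · have h' : a.1.toList < b.1.toList := String.lt_iff_toList_lt.mp h
    simp [h, pvPairKey, Prod.Lex.lt_iff, lt_asymm h']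
  · simp [h, pvPairKey, Prod.Lex.lt_iff]
  · have h' : b.1.toList < a.1.toList := String.lt_iff_toList_lt.mp h
    simp [h', pvPairKey, Prod.Lex.lt_iff, lt_asymm h', h.ne']

lemma pvKey3_lt_iff (s t : String × String × Bool) :
    pvKey3 s < pvKey3 t
      ↔ s.1 < t.1 ∨ (s.1 = t.1 ∧ (s.2.1 < t.2.1 ∨ (s.2.1 = t.2.1 ∧ s.2.2 < t.2.2))) := by
  simp [pvKey3, Prod.Lex.lt_iff]

lemma pvPairKey_lt_iff (x y : String × String) :
    pvPairKey x < pvPairKey y ↔ x.1 < y.1 ∨ (x.1 = y.1 ∧ x.2 < y.2) := by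
  simp [pvPairKey, Prod.Lex.lt_iff]

lemma pvKey3_injective : Function.Injective pvKey3 := by
  intro s t h
  have h2 := toLex.injective h
  have h4 := toLex.injective (congrArg Prod.snd h2)
  exact Prod.ext (congrArg Prod.fst h2)
    (Prod.ext (congrArg Prod.fst h4) (congrArg Prod.snd h4))

-- the three scan equations as plain rewrites
lemma pvScan_nil : pvScan [] = [] := rfl

lemma pvScan_singleton (a b : String) (d : Bool) :
    pvScan [(a, b, d)] = if a = b then [(a, b)] else [] := by
  by_cases h : a = b <;> simp [pvScan, h]

lemma pvScan_cons_cons (a b a' b' : String) (d d' : Bool) (xs : List (String × String × Bool)) :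
    pvScan ((a, b, d) :: (a', b', d') :: xs)
      = if a = b then (a, b) :: pvScan ((a', b', d') :: xs)
        else if a' = a ∧ b' = b then (a, b) :: pvScan xs
        else pvScan ((a', b', d') :: xs) := by
  by_cases h1 : a = b
  · simp [pvScan, h1]
  · by_cases h2 : a' = a ∧ b' = b <;> simp [pvScan, h1, h2]

-- a canonical token has min ≤ max, and a self-loop token is unreversed
lemma pvToken_canon (f t : String) :
    (pvToken f t).1 ≤ (pvToken f t).2.1 ∧
      ((pvToken f t).1 = (pvToken f t).2.1 → (pvToken f t).2.2 = false) := by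
  unfold pvToken
  split_ifs with h
  · exact ⟨le_of_lt h, fun he => absurd he (ne_of_lt h)⟩
  · exact ⟨not_lt.mp h, fun _ => rfl⟩

-- every pair scan emits comes from some token of its input
lemma pvScan_src : ∀ (T : List (String × String × Bool)),
    ∀ x ∈ pvScan T, ∃ t ∈ T, x = (t.1, t.2.1) := by
  intro T
  induction T using List.twoStepInduction with
  | nil => simp [pvScan_nil]
  | singleton u =>
    obtain ⟨a, b, d⟩ := u
    intro x hx
    rw [pvScan_singleton] at hx
    split_ifs at hx with h
    · rcases List.mem_singleton.mp hx with rfl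
      exact ⟨(a, b, d), by simp⟩
    · simp at hx
  | cons_cons u v xs ih1 ih2 =>
    obtain ⟨a, b, d⟩ := u
    obtain ⟨a', b', d'⟩ := v
    intro x hx
    rw [pvScan_cons_cons] at hx
    split_ifs at hx with h1 h2
    · rcases List.mem_cons.mp hx with rfl | hx
      · exact ⟨(a, b, d), by simp⟩
      · obtain ⟨t, ht, rfl⟩ := ih2 (a', b', d') x hx
        exact ⟨t, List.mem_cons_of_mem _ ht, rfl⟩
    · rcases List.mem_cons.mp hx with rfl | hx
      · exact ⟨(a, b, d), by simp⟩
      · obtain ⟨t, ht, rfl⟩ := ih1 x hx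
        exact ⟨t, List.mem_cons_of_mem _ (List.mem_cons_of_mem _ ht), rfl⟩
    · obtain ⟨t, ht, rfl⟩ := ih2 (a', b', d') x hx
      exact ⟨t, List.mem_cons_of_mem _ ht, rfl⟩

-- a strictly sorted token (a,b,false) … (a',b',d') … (a,b,true) sandwich forces (a',b') = (a,b)
lemma key3_sandwich {a b a' b' : String} {d' : Bool}
    (h1 : pvKey3 (a, b, false) < pvKey3 (a', b', d'))
    (h2 : pvKey3 (a', b', d') < pvKey3 (a, b, true)) : a' = a ∧ b' = b := by
  rcases (pvKey3_lt_iff _ _).mp h1 with h | ⟨ha, h | ⟨hb, h⟩⟩ <;>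
    rcases (pvKey3_lt_iff _ _).mp h2 with g | ⟨hga, g | ⟨hgb, g⟩⟩
  · exact absurd g (lt_asymm h)
  · exact absurd (hga ▸ h) (lt_irrefl _)
  · exact absurd (hga ▸ h) (lt_irrefl _)
  · exact absurd (ha ▸ g) (lt_irrefl _)
  · exact absurd g (lt_asymm h)
  · exact absurd (hgb ▸ h) (lt_irrefl _)
  · exact absurd (ha ▸ g) (lt_irrefl _)
  · exact absurd (hb ▸ g) (lt_irrefl _)
  · exact ⟨ha.symm, hgb⟩

-- key3 can never strictly descend from a true-token to the same pair's false-token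
lemma key3_true_not_lt_false (a b : String) :
    ¬ pvKey3 (a, b, true) < pvKey3 (a, b, false) := by
  intro h
  rcases (pvKey3_lt_iff _ _).mp h with h | ⟨_, h | ⟨_, h⟩⟩
  · exact absurd h (lt_irrefl _)
  · exact absurd h (lt_irrefl _)
  · exact absurd h (by simp [Bool.lt_iff])

-- on a strictly key-sorted list of canonical tokens, scan emits exactly the self-loop tokens
-- and the pairs whose both orientations occur
lemma pvScan_mem : ∀ (T : List (String × String × Bool)),
    T.Pairwise (fun s t => pvKey3 s < pvKey3 t) →
    (∀ t ∈ T, t.1 ≤ t.2.1 ∧ (t.1 = t.2.1 → t.2.2 = false)) →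
    ∀ x : String × String,
      (x ∈ pvScan T ↔ ((x.1 = x.2 ∧ (x.1, x.2, false) ∈ T)
          ∨ (x.1 < x.2 ∧ (x.1, x.2, false) ∈ T ∧ (x.1, x.2, true) ∈ T))) := by
  intro T
  induction T using List.twoStepInduction with
  | nil => intro _ _ x; simp [pvScan_nil]
  | singleton u =>
    obtain ⟨a, b, d⟩ := u
    intro _ hv x
    have hvu := hv (a, b, d) (by simp)
    rw [pvScan_singleton]
    by_cases h1 : a = b
    · have hd : d = false := hvu.2 h1
      subst hd; subst h1
      rw [if_pos rfl]
      constructor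
      · intro hx
        rcases List.mem_singleton.mp hx with rfl
        exact Or.inl ⟨rfl, by simp⟩
      · rintro (⟨hxx, hm⟩ | ⟨hlt, _, hm'⟩)
        · rcases List.mem_singleton.mp hm with he
          have hx1 : x.1 = a := congrArg Prod.fst he
          have hx2 : x.2 = a := congrArg (fun t => t.2.1) he
          exact List.mem_singleton.mpr (Prod.ext hx1 hx2)
        · rcases List.mem_singleton.mp hm' with he
          exact absurd (congrArg (fun t => t.2.2) he) (by simp)
    · rw [if_neg h1]
      constructor
      · intro hx; simp at hx
      · rintro (⟨hxx, hm⟩ | ⟨hlt, hm, hm'⟩)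
        · rcases List.mem_singleton.mp hm with he
          have hx1 : x.1 = a := congrArg Prod.fst he
          have hx2 : x.2 = b := congrArg (fun t => t.2.1) he
          exact absurd (hx1 ▸ hx2 ▸ hxx) h1
        · rcases List.mem_singleton.mp hm with he
          rcases List.mem_singleton.mp hm' with he'
          have hd1 : (false : Bool) = d := congrArg (fun t => t.2.2) he
          have hd2 : (true : Bool) = d := congrArg (fun t => t.2.2) he'
          exact absurd (hd1.trans hd2.symm) (by simp)
  | cons_cons u v xs ih1 ih2 =>
    obtain ⟨a, b, d⟩ := u
    obtain ⟨a', b', d'⟩ := v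
    intro hs hv x
    have hhead : ∀ t ∈ (a', b', d') :: xs, pvKey3 (a, b, d) < pvKey3 t := fun _ ht => List.rel_of_pairwise_cons hs ht
    have hs' : ((a', b', d') :: xs).Pairwise (fun s t => pvKey3 s < pvKey3 t) := List.Pairwise.of_cons hs
    have hhead2 : ∀ t ∈ xs, pvKey3 (a', b', d') < pvKey3 t := fun _ ht => List.rel_of_pairwise_cons hs' ht
    have hs'' : xs.Pairwise (fun s t => pvKey3 s < pvKey3 t) := List.Pairwise.of_cons hs'
    have hvu := hv (a, b, d) (by simp)
    have hvrest : ∀ t ∈ (a', b', d') :: xs, t.1 ≤ t.2.1 ∧ (t.1 = t.2.1 → t.2.2 = false) :=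
      fun t ht => hv t (List.mem_cons_of_mem _ ht)
    have hvxs : ∀ t ∈ xs, t.1 ≤ t.2.1 ∧ (t.1 = t.2.1 → t.2.2 = false) :=
      fun t ht => hvrest t (List.mem_cons_of_mem _ ht)
    rw [pvScan_cons_cons]
    split_ifs with h1 h2
    · -- self-loop head: a = b, hence d = false
      have hd : d = false := hvu.2 h1
      subst hd; subst h1
      rw [List.mem_cons, ih2 (a', b', d') hs' hvrest x]
      constructor
      · rintro (rfl | h)
        · exact Or.inl ⟨rfl, by simp⟩
        · rcases h with ⟨hxx, hm⟩ | ⟨hlt, hm, hm'⟩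
          · exact Or.inl ⟨hxx, List.mem_cons_of_mem _ hm⟩
          · exact Or.inr ⟨hlt, List.mem_cons_of_mem _ hm, List.mem_cons_of_mem _ hm'⟩
      · rintro (⟨hxx, hm⟩ | ⟨hlt, hm, hm'⟩)
        · rcases List.mem_cons.mp hm with he | hm2
          · have hx1 : x.1 = a := congrArg Prod.fst he
            have hx2 : x.2 = a := congrArg (fun t => t.2.1) he
            exact Or.inl (Prod.ext hx1 hx2)
          · exact Or.inr (Or.inl ⟨hxx, hm2⟩)
        · rcases List.mem_cons.mp hm' with he' | hm2'
          · exact absurd (congrArg (fun t => t.2.2) he') (by simp)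
          · rcases List.mem_cons.mp hm with he | hm2
            · have hx1 : x.1 = a := congrArg Prod.fst he
              have hx2 : x.2 = a := congrArg (fun t => t.2.1) he
              rw [hx1, hx2] at hlt
              exact absurd hlt (lt_irrefl a)
            · exact Or.inr (Or.inr ⟨hlt, hm2, hm2'⟩)
    · -- adjacent match: the two heads are (a,b,false) and (a,b,true)
      obtain ⟨ha', hb'⟩ := h2
      have ha2 : a = a' := ha'.symm
      have hb2 : b = b' := hb'.symm
      subst ha2; subst hb2
      have hlt1 : pvKey3 (a, b, d) < pvKey3 (a, b, d') := hhead _ (by simp)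
      have hdd : d = false ∧ d' = true := by
        rcases (pvKey3_lt_iff _ _).mp hlt1 with h | ⟨_, h | ⟨_, h⟩⟩
        · exact absurd h (lt_irrefl _)
        · exact absurd h (lt_irrefl _)
        · have := Bool.lt_iff.mp h
          exact ⟨this.1, this.2⟩
      obtain ⟨hd, hd'⟩ := hdd
      subst hd; subst hd'
      have hab : a < b := lt_of_le_of_ne hvu.1 h1
      rw [List.mem_cons, ih1 hs'' hvxs x]
      constructor
      · rintro (rfl | h)
        · exact Or.inr ⟨hab, by simp, by simp⟩
        · rcases h with ⟨hxx, hm⟩ | ⟨hlt, hm, hm'⟩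
          · exact Or.inl ⟨hxx, List.mem_cons_of_mem _ (List.mem_cons_of_mem _ hm)⟩
          · exact Or.inr ⟨hlt, List.mem_cons_of_mem _ (List.mem_cons_of_mem _ hm),
              List.mem_cons_of_mem _ (List.mem_cons_of_mem _ hm')⟩
      · rintro (⟨hxx, hm⟩ | ⟨hlt, hm, hm'⟩)
        · rcases List.mem_cons.mp hm with he | hm2
          · have hx1 : x.1 = a := congrArg Prod.fst he
            have hx2 : x.2 = b := congrArg (fun t => t.2.1) he
            exact absurd (hx1 ▸ hx2 ▸ hxx) h1
          · rcases List.mem_cons.mp hm2 with he | hm3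
            · exact absurd (congrArg (fun t => t.2.2) he) (by simp)
            · exact Or.inr (Or.inl ⟨hxx, hm3⟩)
        · rcases List.mem_cons.mp hm with he | hm2
          · have hx1 : x.1 = a := congrArg Prod.fst he
            have hx2 : x.2 = b := congrArg (fun t => t.2.1) he
            exact Or.inl (Prod.ext hx1 hx2)
          · rcases List.mem_cons.mp hm2 with he | hm3
            · exact absurd (congrArg (fun t => t.2.2) he) (by simp)
            · -- (x.1,x.2,false) ∈ xs while the head (a,b,false) sits before (a,b,true):
              -- impossible only when x = (a,b); otherwise both tokens are in xs
              rcases List.mem_cons.mp hm' with he' | hm3'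
              · have hx1 : x.1 = a := congrArg Prod.fst he'
                have hx2 : x.2 = b := congrArg (fun t => t.2.1) he'
                have hk := hhead (x.1, x.2, false) (List.mem_cons_of_mem _ hm3)
                rw [hx1, hx2] at hk
                exact absurd hk (by
                  intro hk
                  rcases (pvKey3_lt_iff _ _).mp hk with h | ⟨_, h | ⟨_, h⟩⟩
                  · exact absurd h (lt_irrefl _)
                  · exact absurd h (lt_irrefl _)
                  · exact absurd h (by simp))
              · rcases List.mem_cons.mp hm3' with he'' | hm4'
                · have hx1 : x.1 = a := congrArg Prod.fst he''
                  have hx2 : x.2 = b := congrArg (fun t => t.2.1) he''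
                  have hk := hhead2 (x.1, x.2, false) hm3
                  rw [hx1, hx2] at hk
                  exact absurd hk (key3_true_not_lt_false a b)
                · exact Or.inr (Or.inr ⟨hlt, hm3, hm4'⟩)
    · -- no match: the head's pair occurs in exactly one orientation
      rw [ih2 (a', b', d') hs' hvrest x]
      constructor
      · rintro (⟨hxx, hm⟩ | ⟨hlt, hm, hm'⟩)
        · exact Or.inl ⟨hxx, List.mem_cons_of_mem _ hm⟩
        · exact Or.inr ⟨hlt, List.mem_cons_of_mem _ hm, List.mem_cons_of_mem _ hm'⟩
      · rintro (⟨hxx, hm⟩ | ⟨hlt, hm, hm'⟩)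
        · rcases List.mem_cons.mp hm with he | hm2
          · have hx1 : x.1 = a := congrArg Prod.fst he
            have hx2 : x.2 = b := congrArg (fun t => t.2.1) he
            exact absurd (hx1 ▸ hx2 ▸ hxx) h1
          · exact Or.inl ⟨hxx, hm2⟩
        · rcases List.mem_cons.mp hm with he | hm2
          · -- head = (x.1, x.2, false) = (a, b, d); then (a,b,true) would have to be adjacent
            have hx1 : x.1 = a := congrArg Prod.fst he
            have hx2 : x.2 = b := congrArg (fun t => t.2.1) he
            have hdv : d = false := (congrArg (fun t => t.2.2) he).symm
            rcases List.mem_cons.mp hm' with he' | hm2'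
            · have : (true : Bool) = d := congrArg (fun t => t.2.2) he'
              exact absurd (this.trans hdv) (by simp)
            · rcases List.mem_cons.mp hm2' with he'' | hm3'
              · refine absurd ⟨?_, ?_⟩ h2
                · exact (congrArg Prod.fst he''.symm).trans hx1
                · exact (congrArg (fun t => t.2.1) he''.symm).trans hx2
              · have g1 : pvKey3 (a, b, false) < pvKey3 (a', b', d') := by
                  have h0 := hhead (a', b', d') (by simp)
                  rwa [hdv] at h0
                have g2 : pvKey3 (a', b', d') < pvKey3 (a, b, true) := by
                  have h0 := hhead2 (x.1, x.2, true) hm3'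
                  rwa [hx1, hx2] at h0
                exact absurd (key3_sandwich g1 g2) h2
          · rcases List.mem_cons.mp hm' with he' | hm2'
            · -- head = (x.1,x.2,true): the false-token would have to precede it
              have hx1 : x.1 = a := congrArg Prod.fst he'
              have hx2 : x.2 = b := congrArg (fun t => t.2.1) he'
              have hdv : d = true := (congrArg (fun t => t.2.2) he').symm
              have hk := hhead (x.1, x.2, false) hm2
              rw [hx1, hx2, hdv] at hk
              exact absurd hk (key3_true_not_lt_false a b)
            · exact Or.inr ⟨hlt, hm2, hm2'⟩

-- scan's output is strictly increasing in the pair key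
lemma pvScan_pairwise : ∀ (T : List (String × String × Bool)),
    T.Pairwise (fun s t => pvKey3 s < pvKey3 t) →
    (∀ t ∈ T, t.1 ≤ t.2.1 ∧ (t.1 = t.2.1 → t.2.2 = false)) →
    (pvScan T).Pairwise (fun p q => pvPairKey p < pvPairKey q) := by
  intro T
  induction T using List.twoStepInduction with
  | nil => intro _ _; simp [pvScan_nil]
  | singleton u =>
    obtain ⟨a, b, d⟩ := u
    intro _ _
    rw [pvScan_singleton]
    split_ifs <;> simp
  | cons_cons u v xs ih1 ih2 =>
    obtain ⟨a, b, d⟩ := u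
    obtain ⟨a', b', d'⟩ := v
    intro hs hv
    have hhead : ∀ t ∈ (a', b', d') :: xs, pvKey3 (a, b, d) < pvKey3 t := fun _ ht => List.rel_of_pairwise_cons hs ht
    have hs' : ((a', b', d') :: xs).Pairwise (fun s t => pvKey3 s < pvKey3 t) := List.Pairwise.of_cons hs
    have hhead2 : ∀ t ∈ xs, pvKey3 (a', b', d') < pvKey3 t := fun _ ht => List.rel_of_pairwise_cons hs' ht
    have hs'' : xs.Pairwise (fun s t => pvKey3 s < pvKey3 t) := List.Pairwise.of_cons hs'
    have hvu := hv (a, b, d) (by simp)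
    have hvrest : ∀ t ∈ (a', b', d') :: xs, t.1 ≤ t.2.1 ∧ (t.1 = t.2.1 → t.2.2 = false) :=
      fun t ht => hv t (List.mem_cons_of_mem _ ht)
    have hvxs : ∀ t ∈ xs, t.1 ≤ t.2.1 ∧ (t.1 = t.2.1 → t.2.2 = false) :=
      fun t ht => hvrest t (List.mem_cons_of_mem _ ht)
    rw [pvScan_cons_cons]
    split_ifs with h1 h2
    · have hd : d = false := hvu.2 h1
      subst hd; subst h1
      refine List.Pairwise.cons ?_ (ih2 (a', b', d') hs' hvrest)
      intro y hy
      obtain ⟨t, ht, rfl⟩ := pvScan_src _ y hy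
      have hk := hhead t ht
      rcases (pvKey3_lt_iff _ _).mp hk with h | ⟨heq, h | ⟨heq2, h⟩⟩
      · exact (pvPairKey_lt_iff _ _).mpr (Or.inl h)
      · exact (pvPairKey_lt_iff _ _).mpr (Or.inr ⟨heq, h⟩)
      · have ht12 : t.1 = t.2.1 := heq.symm.trans heq2
        have := (hvrest t ht).2 ht12
        rw [this] at h
        exact absurd h (by simp)
    · obtain ⟨ha', hb'⟩ := h2
      have ha2 : a = a' := ha'.symm
      have hb2 : b = b' := hb'.symm
      subst ha2; subst hb2
      have hlt1 : pvKey3 (a, b, d) < pvKey3 (a, b, d') := hhead _ (by simp)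
      have hd' : d' = true := by
        rcases (pvKey3_lt_iff _ _).mp hlt1 with h | ⟨_, h | ⟨_, h⟩⟩
        · exact absurd h (lt_irrefl _)
        · exact absurd h (lt_irrefl _)
        · exact (Bool.lt_iff.mp h).2
      subst hd'
      refine List.Pairwise.cons ?_ (ih1 hs'' hvxs)
      intro y hy
      obtain ⟨t, ht, rfl⟩ := pvScan_src _ y hy
      have hk := hhead2 t ht
      rcases (pvKey3_lt_iff _ _).mp hk with h | ⟨heq, h | ⟨heq2, h⟩⟩
      · exact (pvPairKey_lt_iff _ _).mpr (Or.inl h)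
      · exact (pvPairKey_lt_iff _ _).mpr (Or.inr ⟨heq, h⟩)
      · exact absurd h (by simp [Bool.lt_iff])
    · exact ih2 (a', b', d') hs' hvrest

-- ===== VERDICT (by name: the statement is the Claim_ definition above) =====
theorem find_bidirectional_pairs_spec : Claim_equal_find_bidirectional_pairs := by
  intro edges _
  unfold Spec_find_bidirectional_pairs
  simp only [find_bidirectional_pairs, find_bidirectional_pairs_alt]
  rw [show (([] : List (String × String)), PySem.Set.empty) =
      ((PySem.Set.empty : PySem.Set (String × String)), PySem.Set.empty) from rfl]
  rw [loopA_eq, PySem.Set.update_empty, sorted2_eq_sorted_toLex]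
  set E : PySem.Set (String × String) :=
    edges.foldl (fun s e => PySem.Set.add s (e.1, e.2.1)) PySem.Set.empty with hEdef
  set EP := edges.map (fun e => (e.1, e.2.1)) with hEPdef
  set TP := edges.map (fun e => pvToken e.1 e.2.1) with hTPdef
  have htoks : PySem.Set.ofList TP
      = edges.foldl (fun s e => PySem.Set.add s (pvToken e.1 e.2.1)) PySem.Set.empty := by
    rw [PySem.Set.ofList_eq_foldl, hTPdef, List.foldl_map]
    rfl
  rw [← htoks]
  set T := PySem.List.sorted (PySem.Set.ofList TP) pvKey3 false with hTdef
  have hE : ∀ p : String × String, p ∈ E ↔ p ∈ EP := by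
    intro p
    rw [hEdef, PySem.Set.mem_foldl_add, hEPdef, List.mem_map]
    simp [PySem.Set.empty, eq_comm]
  have hmemT : ∀ u, u ∈ T ↔ u ∈ TP := by
    intro u
    rw [hTdef, PySem.List.mem_sorted, PySem.Set.mem_ofList]
  have hndT : T.Nodup := by
    rw [hTdef]
    exact ((PySem.List.sorted_perm _ _ _).nodup_iff).mpr (PySem.Set.nodup_ofList _)
  have hsT : T.Pairwise (fun s t => pvKey3 s < pvKey3 t) := by
    have h1 : T.Pairwise (fun s t => pvKey3 s ≤ pvKey3 t) := by
      rw [hTdef]; exact PySem.List.sorted_pairwise _ _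
    exact (h1.and hndT).imp fun h =>
      lt_of_le_of_ne h.1 (fun he => h.2 (pvKey3_injective he))
  have hvT : ∀ t ∈ T, t.1 ≤ t.2.1 ∧ (t.1 = t.2.1 → t.2.2 = false) := by
    intro t ht
    rcases List.mem_map.mp ((hmemT t).mp ht) with ⟨e, _, rfl⟩
    exact pvToken_canon e.1 e.2.1
  have htokF : ∀ a b : String, ((a, b, false) ∈ TP) ↔ ((a, b) ∈ EP ∧ a ≤ b) := by
    intro a b
    rw [hTPdef, hEPdef]
    simp only [List.mem_map]
    constructor
    · rintro ⟨e, he, hEq⟩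
      unfold pvToken at hEq
      split_ifs at hEq with hgt
      · exact absurd (congrArg (fun t => t.2.2) hEq) (by simp)
      · have h1 : e.1 = a := congrArg Prod.fst hEq
        have h2 : e.2.1 = b := congrArg (fun t => t.2.1) hEq
        exact ⟨⟨e, he, Prod.ext h1 h2⟩, h1 ▸ h2 ▸ not_lt.mp hgt⟩
    · rintro ⟨⟨e, he, hEq⟩, hle⟩
      refine ⟨e, he, ?_⟩
      have h1 : e.1 = a := congrArg Prod.fst hEq
      have h2 : e.2.1 = b := congrArg Prod.snd hEq
      unfold pvToken
      rw [h1, h2, if_neg (not_lt.mpr hle)]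
  have htokT : ∀ a b : String, ((a, b, true) ∈ TP) ↔ ((b, a) ∈ EP ∧ a < b) := by
    intro a b
    rw [hTPdef, hEPdef]
    simp only [List.mem_map]
    constructor
    · rintro ⟨e, he, hEq⟩
      unfold pvToken at hEq
      split_ifs at hEq with hgt
      · have h1 : e.2.1 = a := congrArg Prod.fst hEq
        have h2 : e.1 = b := congrArg (fun t => t.2.1) hEq
        exact ⟨⟨e, he, Prod.ext h2 h1⟩, h1 ▸ h2 ▸ hgt⟩
      · exact absurd (congrArg (fun t => t.2.2) hEq) (by simp)
    · rintro ⟨⟨e, he, hEq⟩, hlt⟩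
      refine ⟨e, he, ?_⟩
      have h1 : e.1 = b := congrArg Prod.fst hEq
      have h2 : e.2.1 = a := congrArg Prod.snd hEq
      unfold pvToken
      rw [h1, h2, if_pos hlt]
  have hnd1 : (pvScan T).Nodup :=
    List.Pairwise.imp (fun h => by rintro rfl; exact lt_irrefl _ h)
      (pvScan_pairwise T hsT hvT)
  apply PySem.List.sorted_eq_of_perm_of_pairwise_lt
  · apply (List.perm_ext_iff_of_nodup hnd1 (PySem.Set.nodup_ofList _)).mpr
    intro x
    rw [pvScan_mem T hsT hvT x, PySem.Set.mem_ofList]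
    simp only [List.mem_map, List.mem_filter, decide_eq_true_eq, pySortedPair_eq_minmax]
    simp only [hmemT, htokF, htokT]
    constructor
    · rintro (⟨hxx, hm, _⟩ | ⟨hlt, ⟨hm, _⟩, hr, _⟩)
      · refine ⟨(x.1, x.2), ⟨(hE _).mpr hm, ?_⟩, ?_⟩
        · have : ((x.1, x.2).2, (x.1, x.2).1) = (x.1, x.2) := by
            rw [show (x.1, x.2).2 = x.2 from rfl, show (x.1, x.2).1 = x.1 from rfl, hxx]
          rw [this]
          exact (hE _).mpr hm
        · rw [minmaxPair, if_pos (le_of_eq hxx)]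
      · refine ⟨(x.1, x.2), ⟨(hE _).mpr hm, (hE _).mpr hr⟩, ?_⟩
        rw [minmaxPair, if_pos (le_of_lt hlt)]
    · rintro ⟨⟨f, t⟩, ⟨hp, hr⟩, rfl⟩
      have hp' : (f, t) ∈ EP := (hE _).mp hp
      have hr' : (t, f) ∈ EP := (hE _).mp hr
      rcases lt_trichotomy f t with h | h | h
      · rw [minmaxPair, if_pos (le_of_lt h)]
        exact Or.inr ⟨h, ⟨hp', le_of_lt h⟩, hr', h⟩
      · subst h
        rw [minmaxPair, if_pos (le_refl f)]
        exact Or.inl ⟨rfl, hp', le_refl f⟩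
      · rw [minmaxPair, if_neg (not_le.mpr h)]
        exact Or.inr ⟨h, ⟨hr', le_of_lt h⟩, hp', h⟩
  · exact pvScan_pairwise T hsT hvT
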